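-- pv_equiv track=rewrite | github.com/Th3-Animal/AoC2024 | AoCD9.py | findCharInList
-- ===== SOURCE A (Python) =====
-- def findCharInList(input, target_char):
--     groups = []
--     current_group = []
--
--     for index, item in enumerate(input):
--         if item == target_char:
--             current_group.append(index)  # Add the position of the target char
--         else:
--             if current_group:
--                 groups.append(current_group)  # Save the completed group
--                 current_group = []  # Reset the group
--     if current_group:
--         groups.append(current_group)  # Append the last group if it exists
--
--     return [(len(group), group) for group in groups]
-- ===== SOURCE B (Python) =====
-- def findCharInList(input, target_char):
--     result = []
--     i, n = 0, len(input)
--     while i < n: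
--         if input[i] == target_char:
--             j = i
--             while j < n and input[j] == target_char:
--                 j += 1
--             result.append((j - i, list(range(i, j))))
--             i = j
--         else:
--             i += 1
--     return result
-- ===== Notes on version B (the rewrite author's own statement) =====
-- stated objective: alternative
-- what changed: Replaces the accumulator flush-and-reset state machine plus a final list comprehension with an index-based two-pointer scan that finds each run's end directly and emits (length, range(i, j)) per run in one step.
import Mathlib
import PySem

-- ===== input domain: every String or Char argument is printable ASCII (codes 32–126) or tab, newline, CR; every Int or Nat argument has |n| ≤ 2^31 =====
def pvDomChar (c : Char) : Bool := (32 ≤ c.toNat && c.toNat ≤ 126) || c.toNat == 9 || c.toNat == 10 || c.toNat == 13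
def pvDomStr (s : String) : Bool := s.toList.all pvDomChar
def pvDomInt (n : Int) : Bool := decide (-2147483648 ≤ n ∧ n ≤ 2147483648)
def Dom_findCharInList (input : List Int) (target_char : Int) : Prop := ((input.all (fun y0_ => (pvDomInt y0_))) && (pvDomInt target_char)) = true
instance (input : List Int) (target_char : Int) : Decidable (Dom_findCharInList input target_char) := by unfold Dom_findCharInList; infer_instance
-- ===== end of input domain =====

-- B replaces A's flush-and-reset accumulator state machine (plus final comprehension) by a
-- two-pointer index scan that locates each run's end and emits (length, indices) directly
-- (objective: alternative, same cost).

-- ===== PORT A =====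
-- loop body of A's for-loop (state = (groups, current_group))
def pvStepA (t : Int) (s : List (List Int) × List Int) (p : Int × Int) : List (List Int) × List Int :=
  if p.2 = t then (s.1, s.2 ++ [p.1])
  else if s.2 ≠ [] then (s.1 ++ [s.2], ([] : List Int)) else s

-- the trailing 'if current_group: groups.append(current_group)'
def pvFlushA (s : List (List Int) × List Int) : List (List Int) :=
  if s.2 ≠ [] then s.1 ++ [s.2] else s.1

def findCharInList (input : List Int) (target_char : Int) : List (Int × List Int) :=
  (pvFlushA ((PySem.List.enumerate input 0).foldl (pvStepA target_char) ([], []))).map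
    (fun g => ((g.length : Int), g))

-- ===== PORT B =====
-- inner while loop of Source B: advance j while input[j] == target_char
def pvRunEnd (input : List Int) (t : Int) (n j : Nat) : Nat :=
  if h : j < n ∧ PySem.List.pyGetD input (j : Int) 0 = t then pvRunEnd input t n (j + 1) else j
termination_by n - j
decreasing_by omega

theorem pvRunEnd_le (input : List Int) (t : Int) (n j : Nat) : j ≤ pvRunEnd input t n j := by
  unfold pvRunEnd
  split
  · exact le_trans (by omega) (pvRunEnd_le input t n (j + 1))
  · exact le_rfl
termination_by n - j
decreasing_by omega

-- outer while loop of Source B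
def pvAltLoop (input : List Int) (t : Int) (n i : Nat) : List (Int × List Int) :=
  if h : i < n then
    if ht : PySem.List.pyGetD input (i : Int) 0 = t then
      let j := pvRunEnd input t n i
      ((j : Int) - (i : Int), PySem.List.pyRange (i : Int) (j : Int) 1) :: pvAltLoop input t n j
    else pvAltLoop input t n (i + 1)
  else []
termination_by n - i
decreasing_by
  · have h1 : pvRunEnd input t n i = pvRunEnd input t n (i + 1) := by
      rw [pvRunEnd]; simp [h, ht]
    have h2 := pvRunEnd_le input t n (i + 1)
    omega
  · omega

def findCharInList_alt (input : List Int) (target_char : Int) : List (Int × List Int) :=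
  pvAltLoop input target_char input.length 0

-- ===== PRECONDITION & SPEC =====
def Spec_findCharInList (input : List Int) (target_char : Int) (out : List (Int × List Int)) : Prop := out = findCharInList_alt input target_char
instance (input : List Int) (target_char : Int) (out : List (Int × List Int)) : Decidable (Spec_findCharInList input target_char out) := by unfold Spec_findCharInList; infer_instance

-- ===== CLAIM (what is proved, stated in full; the proofs are below) =====
def Claim_equal_findCharInList : Prop := ∀ (input : List Int) (target_char : Int), Dom_findCharInList input target_char → Spec_findCharInList input target_char (findCharInList input target_char)

-- ===== LEMMAS AND PROOFS =====

-- mediator: the groups A will still emit from remaining list l, at index i, with current group cur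
def pvG (t : Int) (i : Int) (cur : List Int) : List Int → List (List Int)
  | [] => if cur = [] then [] else [cur]
  | x :: xs =>
    if x = t then pvG t (i + 1) (cur ++ [i]) xs
    else if cur = [] then pvG t (i + 1) [] xs else cur :: pvG t (i + 1) [] xs

theorem pvG_A (t : Int) (l : List Int) : ∀ (i : Int) (gs : List (List Int)) (cur : List Int),
    pvFlushA ((PySem.List.enumerate l i).foldl (pvStepA t) (gs, cur)) = gs ++ pvG t i cur l := by
  induction l with
  | nil => intro i gs cur; by_cases hc : cur = [] <;> simp [pvFlushA, pvG, hc]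
  | cons x xs ih =>
    intro i gs cur
    rw [PySem.List.enumerate_cons, List.foldl_cons]
    by_cases hx : x = t
    · simp only [pvStepA, hx, if_pos rfl]
      rw [ih]; simp [pvG, hx]
    · by_cases hc : cur = []
      · simp only [pvStepA, hx, if_neg hx, hc, ne_eq, not_true_eq_false, if_false]
        rw [ih]; simp [pvG, hx, hc]
      · simp only [pvStepA, if_neg hx, ne_eq, hc, not_false_eq_true, if_true]
        rw [ih]; simp [pvG, hx, hc]

theorem pvRunEnd_le_n (input : List Int) (t : Int) (n j : Nat) (h : j ≤ n) :
    pvRunEnd input t n j ≤ n := by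
  unfold pvRunEnd
  split
  · next hc => exact pvRunEnd_le_n input t n (j + 1) (by omega)
  · exact h
termination_by n - j
decreasing_by omega

theorem pvG_run (input : List Int) (t : Int) : ∀ (d i : Nat) (cur : List Int),
    i ≤ input.length → d = input.length - i →
    (cur ≠ [] ∨ (i < input.length ∧ PySem.List.pyGetD input (i : Int) 0 = t)) →
    pvG t (i : Int) cur (input.drop i) =
      (cur ++ PySem.List.pyRange (i : Int) ((pvRunEnd input t input.length i : Nat) : Int) 1)
        :: pvG t ((pvRunEnd input t input.length i : Nat) : Int) [] (input.drop (pvRunEnd input t input.length i)) := by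
  intro d
  induction d with
  | zero =>
    intro i cur hi hd hcase
    have hin : i = input.length := by omega
    rcases hcase with hc | hlt
    · have hre : pvRunEnd input t input.length i = i := by
        rw [pvRunEnd]; simp [hin]
      rw [hre, hin]
      simp [pvG, hc, PySem.List.pyRange_one_eq_nil (le_refl _)]
    · omega
  | succ d ih =>
    intro i cur hi hd hcase
    by_cases hlt : i < input.length
    · have hdrop : input.drop i = input[i] :: input.drop (i + 1) :=
        List.drop_eq_getElem_cons hlt
      have hget : PySem.List.pyGetD input (i : Int) 0 = input[i] := by
        simp [PySem.List.pyGetD, PySem.List.pyGet?, PySem.List.pyIdx?, hlt, List.getElem?_eq_getElem hlt]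
      by_cases hx : input[i] = t
      · -- run continues
        have hre : pvRunEnd input t input.length i = pvRunEnd input t input.length (i + 1) := by
          rw [pvRunEnd]
          simp [hlt, hget, hx]
        have hih := ih (i + 1) (cur ++ [(i : Int)]) (by omega) (by omega)
          (Or.inl (by simp))
        rw [hdrop]
        simp only [pvG, if_pos hx]
        rw [hre]
        push_cast at hih ⊢
        rw [hih]
        have hj1 : (i + 1 : Nat) ≤ pvRunEnd input t input.length (i + 1) :=
          pvRunEnd_le input t input.length (i + 1)
        have hcons : PySem.List.pyRange (i : Int) ((pvRunEnd input t input.length (i + 1) : Nat) : Int) 1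
            = (i : Int) :: PySem.List.pyRange ((i : Int) + 1) ((pvRunEnd input t input.length (i + 1) : Nat) : Int) 1 :=
          PySem.List.pyRange_one_cons (by exact_mod_cast by omega)
        rw [hcons]
        simp
      · -- run ends here: cur must be nonempty
        have hre : pvRunEnd input t input.length i = i := by
          rw [pvRunEnd]; simp [hget, hx]
        have hc : cur ≠ [] := by
          rcases hcase with hc | ⟨_, hgt⟩
          · exact hc
          · exact absurd (hget ▸ hgt) hx
        rw [hre, PySem.List.pyRange_one_eq_nil (le_refl _), List.append_nil, hdrop]
        simp [pvG, hx, hc]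
    · omega

theorem pvG_B (input : List Int) (t : Int) : ∀ (d i : Nat), i ≤ input.length → d = input.length - i →
    pvAltLoop input t input.length i =
      (pvG t (i : Int) [] (input.drop i)).map (fun g => ((g.length : Int), g)) := by
  intro d
  induction d using Nat.strong_induction_on with
  | _ d ih =>
    intro i hi hd
    by_cases hlt : i < input.length
    · rw [pvAltLoop, dif_pos hlt]
      by_cases hx : PySem.List.pyGetD input (i : Int) 0 = t
      · rw [dif_pos hx]
        set j := pvRunEnd input t input.length i with hj
        have hij : i ≤ j := pvRunEnd_le input t input.length i
        have hjn : j ≤ input.length := pvRunEnd_le_n input t input.length i (by omega)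
        have hrun := pvG_run input t (input.length - i) i [] (by omega) rfl
          (Or.inr ⟨hlt, hx⟩)
        have hilt : i < j := by
          have h1 : j = pvRunEnd input t input.length (i + 1) := by
            rw [hj]; conv_lhs => rw [pvRunEnd]
            simp [hlt, hx]
          have h2 := pvRunEnd_le input t input.length (i + 1)
          omega
        have hlen : ((List.length (PySem.List.pyRange (i : Int) (j : Int) 1) : Int)) = (j : Int) - (i : Int) := by
          rw [PySem.List.length_pyRange_one]
          omega
        rw [← hj] at hrun
        rw [hrun, List.map_cons, List.nil_append]
        have htail : pvAltLoop input t input.length j =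
            List.map (fun g => ((g.length : Int), g)) (pvG t (j : Int) [] (List.drop j input)) := by
          by_cases hjeq : j = input.length
          · rw [pvAltLoop, dif_neg (by omega), hjeq]
            simp [pvG]
          · exact ih (input.length - j) (by omega) j hjn rfl
        simp only [htail, hlen]
      · rw [dif_neg hx]
        have hdrop : input.drop i = input[i] :: input.drop (i + 1) :=
          List.drop_eq_getElem_cons hlt
        have hget : PySem.List.pyGetD input (i : Int) 0 = input[i] := by
          simp [PySem.List.pyGetD, PySem.List.pyGet?, PySem.List.pyIdx?, hlt, List.getElem?_eq_getElem hlt]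
        have hx' : ¬ input[i] = t := by rw [← hget]; exact hx
        rw [hdrop]
        simp only [pvG, if_neg hx', if_pos rfl]
        have := ih (input.length - (i + 1)) (by omega) (i + 1) (by omega) rfl
        push_cast at this ⊢
        exact this
    · have hin : i = input.length := by omega
      rw [pvAltLoop, dif_neg (by omega), hin]
      simp [pvG]

-- ===== VERDICT (by name: the statement is the Claim_ definition above) =====
theorem findCharInList_spec : Claim_equal_findCharInList := by
  intro input t _
  unfold Spec_findCharInList findCharInList findCharInList_alt
  rw [pvG_A t input 0 [] []]
  rw [pvG_B input t input.length 0 (by omega) (by omega)]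
  simp
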